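-- pv_equiv track=rewrite | github.com/Ghost---Shadow/vamos-hose | cleaning-scripts/find_elements.py | extract_elements_from_hose
-- ===== SOURCE A (Python) =====
-- def extract_elements_from_hose(hose_code):
--     """
--     Extract all elements from a HOSE code
--
--     Returns:
--         set of element symbols found
--     """
--     elements = set()
--
--     # List of possible elements (ordered by length for proper matching)
--     # Two-letter elements first to avoid confusion (e.g., Cl before C)
--     element_list = [
--         'Cl', 'Br', 'Si', 'Se', 'Sn', 'Pb', 'Bi',  # Two-letter elements
--         'C', 'H', 'O', 'N', 'S', 'P', 'F', 'B', 'I',  # Single-letter common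
--         'K', 'V', 'W', 'X', 'Y', 'Z', 'Q',  # Other single letters
--         'Al', 'As', 'Au', 'Ag', 'Ca', 'Cd', 'Co', 'Cr', 'Cu',  # More two-letter
--         'Fe', 'Ga', 'Ge', 'Hg', 'Li', 'Mg', 'Mn', 'Mo', 'Na',
--         'Ni', 'Pt', 'Rb', 'Re', 'Ru', 'Sb', 'Sc', 'Sr', 'Te',
--         'Ti', 'Tl', 'Zn', 'Zr'
--     ]
--
--     i = 0
--     while i < len(hose_code):
--         # Try two-letter elements first
--         if i + 1 < len(hose_code):
--             two_char = hose_code[i:i+2]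
--             if two_char in element_list:
--                 elements.add(two_char)
--                 i += 2
--                 continue
--
--         # Try single-letter elements
--         one_char = hose_code[i]
--         if one_char in element_list:
--             elements.add(one_char)
--             i += 1
--         else:
--             i += 1
--
--     return elements
-- ===== SOURCE B (Python) =====
-- # Per-position matching instead of a cursor loop: each index is tested
-- # independently (two-letter symbol first, else one-letter); this equals the
-- # greedy scan because second letters of two-letter symbols are lowercase and
-- # thus never start a match themselves.
-- TWO_LETTER = ['Cl', 'Br', 'Si', 'Se', 'Sn', 'Pb', 'Bi',
--               'Al', 'As', 'Au', 'Ag', 'Ca', 'Cd', 'Co', 'Cr', 'Cu',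
--               'Fe', 'Ga', 'Ge', 'Hg', 'Li', 'Mg', 'Mn', 'Mo', 'Na',
--               'Ni', 'Pt', 'Rb', 'Re', 'Ru', 'Sb', 'Sc', 'Sr', 'Te',
--               'Ti', 'Tl', 'Zn', 'Zr']
-- ONE_LETTER = ['C', 'H', 'O', 'N', 'S', 'P', 'F', 'B', 'I',
--               'K', 'V', 'W', 'X', 'Y', 'Z', 'Q']
--
--
-- def _match_at(s, i):
--     two = s[i:i + 2]
--     if two in TWO_LETTER:
--         return two
--     c = s[i]
--     if c in ONE_LETTER:
--         return c
--     return None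
--
--
-- def extract_elements_from_hose(hose_code):
--     return {m for i in range(len(hose_code))
--             if (m := _match_at(hose_code, i)) is not None}
-- ===== Notes on version B (the rewrite author's own statement) =====
-- stated objective: simpler
-- what changed: Replaces A's greedy while-loop with a mutable cursor that consumes one or two characters by a single per-position set comprehension that tests each index independently (two-letter symbol first, else one-letter); the results coincide because second letters of two-letter symbols are lowercase and never start or form a symbol.
import Mathlib
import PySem

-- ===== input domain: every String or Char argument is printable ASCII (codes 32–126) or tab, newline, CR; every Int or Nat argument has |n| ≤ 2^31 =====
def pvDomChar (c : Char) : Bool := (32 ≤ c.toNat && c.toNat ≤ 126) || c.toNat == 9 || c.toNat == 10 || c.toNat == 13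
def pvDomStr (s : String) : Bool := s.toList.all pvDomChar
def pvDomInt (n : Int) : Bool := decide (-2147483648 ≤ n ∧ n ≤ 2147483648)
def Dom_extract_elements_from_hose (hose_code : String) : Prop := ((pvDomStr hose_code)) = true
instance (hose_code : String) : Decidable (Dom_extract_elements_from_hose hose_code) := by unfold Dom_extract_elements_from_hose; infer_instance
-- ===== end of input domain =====

-- B replaces A's greedy cursor loop by independent per-position matching (two-letter
-- symbol first, else one-letter), which yields the same set because second letters of
-- two-letter symbols never start a match; objective: simpler (no mutable cursor).

-- ===== PORT A =====
def pvElementList : List String :=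
  ["Cl", "Br", "Si", "Se", "Sn", "Pb", "Bi",
   "C", "H", "O", "N", "S", "P", "F", "B", "I",
   "K", "V", "W", "X", "Y", "Z", "Q",
   "Al", "As", "Au", "Ag", "Ca", "Cd", "Co", "Cr", "Cu",
   "Fe", "Ga", "Ge", "Hg", "Li", "Mg", "Mn", "Mo", "Na",
   "Ni", "Pt", "Rb", "Re", "Ru", "Sb", "Sc", "Sr", "Te",
   "Ti", "Tl", "Zn", "Zr"]

-- the while loop over index i, as structural recursion on the remaining characters:
-- `c1 :: c2 :: rest2` is the `i + 1 < len` case (hose_code[i:i+2] = [c1,c2]), `[c1]` the last index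
def pvALoop : List Char → PySem.Set String → PySem.Set String
  | [], elements => elements
  | [c1], elements =>
      let one_char := String.ofList [c1]
      if one_char ∈ pvElementList then pvALoop [] (PySem.Set.add elements one_char)
      else pvALoop [] elements
  | c1 :: c2 :: rest2, elements =>
      let two_char := String.ofList [c1, c2]
      if two_char ∈ pvElementList then
        pvALoop rest2 (PySem.Set.add elements two_char)
      else
        let one_char := String.ofList [c1]
        if one_char ∈ pvElementList then pvALoop (c2 :: rest2) (PySem.Set.add elements one_char)
        else pvALoop (c2 :: rest2) elements

def extract_elements_from_hose (hose_code : String) : List String :=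
  pvALoop hose_code.toList PySem.Set.empty

-- ===== PORT B =====
def pvTwoLetter : List String :=
  ["Cl", "Br", "Si", "Se", "Sn", "Pb", "Bi",
   "Al", "As", "Au", "Ag", "Ca", "Cd", "Co", "Cr", "Cu",
   "Fe", "Ga", "Ge", "Hg", "Li", "Mg", "Mn", "Mo", "Na",
   "Ni", "Pt", "Rb", "Re", "Ru", "Sb", "Sc", "Sr", "Te",
   "Ti", "Tl", "Zn", "Zr"]

def pvOneLetter : List String :=
  ["C", "H", "O", "N", "S", "P", "F", "B", "I",
   "K", "V", "W", "X", "Y", "Z", "Q"]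

-- _match_at(s, i) for 0 ≤ i < len(s): s[i:i+2] = (s.drop i).take 2, s[i] = (s.drop i).head
-- (head? is never none at the call sites, where i ∈ range(len(s)))
def pvMatchAt (s : List Char) (i : Nat) : Option String :=
  let two := String.ofList ((s.drop i).take 2)
  if two ∈ pvTwoLetter then some two
  else
    match (s.drop i).head? with
    | some c => if String.ofList [c] ∈ pvOneLetter then some (String.ofList [c]) else none
    | none => none

def extract_elements_from_hose_alt (hose_code : String) : List String :=
  PySem.Set.ofList ((List.range hose_code.toList.length).filterMap (pvMatchAt hose_code.toList))

-- ===== PRECONDITION & SPEC =====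
def Spec_extract_elements_from_hose (hose_code : String) (out : List String) : Prop := out = extract_elements_from_hose_alt hose_code
instance (hose_code : String) (out : List String) : Decidable (Spec_extract_elements_from_hose hose_code out) := by unfold Spec_extract_elements_from_hose; infer_instance

-- ===== CLAIM (what is proved, stated in full; the proofs are below) =====
def Claim_equal_extract_elements_from_hose : Prop := ∀ (hose_code : String), Dom_extract_elements_from_hose hose_code → Spec_extract_elements_from_hose hose_code (extract_elements_from_hose hose_code)

-- ===== LEMMAS AND PROOFS =====

-- membership in a list of strings, read on the character level
lemma pvMemToList (s : String) (L : List String) : s ∈ L ↔ s.toList ∈ L.map String.toList := by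
  rw [List.mem_map_of_injective]
  intro a b h; rwa [← String.toList_inj]

lemma pvTwoMap : pvTwoLetter.map String.toList =
  [['C','l'], ['B','r'], ['S','i'], ['S','e'], ['S','n'], ['P','b'], ['B','i'],
   ['A','l'], ['A','s'], ['A','u'], ['A','g'], ['C','a'], ['C','d'], ['C','o'], ['C','r'], ['C','u'],
   ['F','e'], ['G','a'], ['G','e'], ['H','g'], ['L','i'], ['M','g'], ['M','n'], ['M','o'], ['N','a'],
   ['N','i'], ['P','t'], ['R','b'], ['R','e'], ['R','u'], ['S','b'], ['S','c'], ['S','r'], ['T','e'],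
   ['T','i'], ['T','l'], ['Z','n'], ['Z','r']] := by decide

lemma pvOneMap : pvOneLetter.map String.toList =
  [['C'], ['H'], ['O'], ['N'], ['S'], ['P'], ['F'], ['B'], ['I'],
   ['K'], ['V'], ['W'], ['X'], ['Y'], ['Z'], ['Q']] := by decide

-- A's single list is, as a set, B's two lists together
lemma pvPerm : pvElementList.Perm (pvTwoLetter ++ pvOneLetter) := by decide

lemma pvOneNotTwo (c : Char) : String.ofList [c] ∉ pvTwoLetter := by
  rw [pvMemToList, pvTwoMap]; simp

lemma pvTwoNotOne (c d : Char) : String.ofList [c, d] ∉ pvOneLetter := by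
  rw [pvMemToList, pvOneMap]; simp

lemma pvMemElem2 (c d : Char) :
    String.ofList [c, d] ∈ pvElementList ↔ String.ofList [c, d] ∈ pvTwoLetter := by
  rw [pvPerm.mem_iff, List.mem_append]
  simp [pvTwoNotOne c d]

lemma pvMemElem1 (c : Char) :
    String.ofList [c] ∈ pvElementList ↔ String.ofList [c] ∈ pvOneLetter := by
  rw [pvPerm.mem_iff, List.mem_append]
  simp [pvOneNotTwo c]

-- a second letter of a two-letter symbol starts no match
lemma pvSkip (c d : Char) (h : String.ofList [c, d] ∈ pvTwoLetter) :
    (∀ e, String.ofList [d, e] ∉ pvTwoLetter) ∧ String.ofList [d] ∉ pvOneLetter := by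
  rw [pvMemToList, pvTwoMap] at h
  simp only [String.toList_ofList] at h
  fin_cases h <;>
    exact ⟨fun e => by rw [pvMemToList, pvTwoMap]; simp,
           by rw [pvMemToList, pvOneMap]; simp⟩

-- per-position matches in left-to-right order
def pvG : List Char → List String
  | [] => []
  | c :: rest =>
      match pvMatchAt (c :: rest) 0 with
      | some m => m :: pvG rest
      | none => pvG rest

lemma pvMatchAt_succ (c : Char) (rest : List Char) (i : Nat) :
    pvMatchAt (c :: rest) (i + 1) = pvMatchAt rest i := rfl

lemma pvB_eq_G (cs : List Char) : (List.range cs.length).filterMap (pvMatchAt cs) = pvG cs := by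
  induction cs with
  | nil => rfl
  | cons c rest ih =>
      rw [List.length_cons, List.range_succ_eq_map, List.filterMap_cons, List.filterMap_map]
      have : (pvMatchAt (c :: rest)) ∘ Nat.succ = pvMatchAt rest := by
        funext i; exact pvMatchAt_succ c rest i
      rw [this, ih, pvG]
      cases pvMatchAt (c :: rest) 0 <;> rfl

-- head match at a position whose character is a second letter: none
lemma pvG_skip (c d : Char) (h : String.ofList [c, d] ∈ pvTwoLetter) (rest : List Char) :
    pvG (d :: rest) = pvG rest := by
  obtain ⟨h2, h1⟩ := pvSkip c d h
  rw [pvG]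
  have hm : pvMatchAt (d :: rest) 0 = none := by
    cases rest with
    | nil => simp [pvMatchAt, pvOneNotTwo d, h1]
    | cons e rest' => simp [pvMatchAt, h2 e, h1]
  rw [hm]

lemma pvALoop_eq (cs : List Char) (acc : PySem.Set String) :
    pvALoop cs acc = List.foldl PySem.Set.add acc (pvG cs) := by
  induction cs, acc using pvALoop.induct with
  | case1 acc => rfl
  | case2 c1 acc _oc h ih =>
      have h' : String.ofList [c1] ∈ pvElementList := h
      have hb := (pvMemElem1 c1).mp h'
      simp [pvALoop, pvG, pvMatchAt, pvOneNotTwo c1, h', hb]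
  | case3 c1 acc _oc h ih =>
      have h' : String.ofList [c1] ∉ pvElementList := h
      have hb : String.ofList [c1] ∉ pvOneLetter := fun hx => h' ((pvMemElem1 c1).mpr hx)
      simp [pvALoop, pvG, pvMatchAt, pvOneNotTwo c1, h', hb]
  | case4 c1 c2 rest2 acc _tc h ih =>
      have h' : String.ofList [c1, c2] ∈ pvElementList := h
      have hb := (pvMemElem2 c1 c2).mp h'
      have hm : pvMatchAt (c1 :: c2 :: rest2) 0 = some (String.ofList [c1, c2]) := by
        simp [pvMatchAt, hb]
      rw [pvALoop, if_pos h', pvG, hm, pvG_skip c1 c2 hb rest2, List.foldl_cons]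
      exact ih
  | case5 c1 c2 rest2 acc _tc h _oc h1 ih =>
      have h' : String.ofList [c1, c2] ∉ pvElementList := h
      have h1' : String.ofList [c1] ∈ pvElementList := h1
      have hb : String.ofList [c1, c2] ∉ pvTwoLetter := fun hx => h' ((pvMemElem2 c1 c2).mpr hx)
      have hb1 := (pvMemElem1 c1).mp h1'
      have hm : pvMatchAt (c1 :: c2 :: rest2) 0 = some (String.ofList [c1]) := by
        simp [pvMatchAt, hb, hb1]
      rw [pvALoop, if_neg h', if_pos h1', pvG, hm, List.foldl_cons]
      exact ih
  | case6 c1 c2 rest2 acc _tc h _oc h1 ih =>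
      have h' : String.ofList [c1, c2] ∉ pvElementList := h
      have h1' : String.ofList [c1] ∉ pvElementList := h1
      have hb : String.ofList [c1, c2] ∉ pvTwoLetter := fun hx => h' ((pvMemElem2 c1 c2).mpr hx)
      have hb1 : String.ofList [c1] ∉ pvOneLetter := fun hx => h1' ((pvMemElem1 c1).mpr hx)
      have hm : pvMatchAt (c1 :: c2 :: rest2) 0 = none := by
        simp [pvMatchAt, hb, hb1]
      rw [pvALoop, if_neg h', if_neg h1', pvG, hm]
      exact ih

-- ===== VERDICT (by name: the statement is the Claim_ definition above) =====
theorem extract_elements_from_hose_spec : Claim_equal_extract_elements_from_hose := by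
  intro hose_code _
  unfold Spec_extract_elements_from_hose extract_elements_from_hose extract_elements_from_hose_alt
  rw [pvALoop_eq, pvB_eq_G, PySem.Set.ofList_eq_foldl]
  rfl
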